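-- pv_equiv track=rewrite | github.com/C4T-BuT-S4D/bricsctf-2023-stage1 | tasks/crp/sqrt/solve/5.py | get_ways_even
-- ===== SOURCE A (Python) =====
-- import itertools
--
-- def get_ways_even(group):
--     if len(group) == 0:
--         return [()]
--     assert len(group) % 2 == 0
--     ways = []
--     for perm in itertools.permutations(group, r=len(group)):
--         ok = True
--         for x,y in [perm[i:i+2] for i in range(0,len(perm),2)]:
--             if x > y:
--                 ok = False
--                 break
--         if not ok:
--             continue
--         if any(perm[i] > perm[i+2] for i in range(0, len(perm)-2, 2)):
--             continue
--         prod_elts = []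
--         for x,y in [perm[i:i+2] for i in range(0,len(perm),2)]:
--             joins = []
--             for rot in range(len(y)):
--                 ry = y[rot:] + y[:rot]
--                 p = [a for pair in zip(x, ry) for a in pair]
--                 joins.append(p)
--             prod_elts.append(joins)
--         ways += list(itertools.product(*prod_elts))
--     return ways
-- ===== SOURCE B (Python) =====
-- import itertools
--
-- def _joins(x, y):
--     return [[a for pair in zip(x, y[rot:] + y[:rot]) for a in pair]
--             for rot in range(len(y))]
--
-- def _matchings(rem):
--     # canonical pair sequences: each first component is a minimum of what remains
--     if not rem:
--         return [[]]
--     mn = min(rem)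
--     out = []
--     for i in range(len(rem)):
--         if rem[i] != mn:
--             continue
--         rest = rem[:i] + rem[i+1:]
--         for j in range(len(rest)):
--             for tail in _matchings(rest[:j] + rest[j+1:]):
--                 out.append([(rem[i], rest[j])] + tail)
--     return out
--
-- def get_ways_even(group):
--     if len(group) == 0:
--         return [()]
--     ways = []
--     for m in _matchings(list(group)):
--         blocks = [_joins(x, y) for (x, y) in m]
--         ways += list(itertools.product(*blocks))
--     return ways
-- ===== Notes on version B (the rewrite author's own statement) =====
-- stated objective: alternative
-- what changed: A filters all n! permutations of the group for the canonical pair-order conditions; B recursively enumerates only the canonical pair sequences directly (pairing a minimal remaining element with each other remaining element), then expands the same rotation-join products.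
import Mathlib
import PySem

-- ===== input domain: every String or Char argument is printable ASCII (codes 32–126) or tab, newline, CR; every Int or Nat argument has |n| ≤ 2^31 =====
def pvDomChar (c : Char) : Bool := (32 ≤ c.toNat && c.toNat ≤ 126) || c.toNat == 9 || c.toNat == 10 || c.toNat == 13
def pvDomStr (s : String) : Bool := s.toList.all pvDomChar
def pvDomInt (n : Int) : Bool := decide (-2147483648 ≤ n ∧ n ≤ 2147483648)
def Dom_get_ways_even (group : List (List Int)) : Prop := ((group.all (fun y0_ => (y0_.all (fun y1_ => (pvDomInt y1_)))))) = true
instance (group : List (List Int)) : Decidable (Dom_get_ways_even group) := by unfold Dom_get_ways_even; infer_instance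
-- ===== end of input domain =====

-- B replaces A's scan of all n! permutations by a direct recursive enumeration of the
-- canonical pair sequences (each first component a minimum of what remains); same values.

-- ===== PORT A =====
-- itertools.product(*ls), first factor varying slowest (CPython order); shared by both ports
def pyProduct {α : Type} : List (List α) → List (List α)
  | [] => [[]]
  | l :: ls => l.flatMap (fun a => (pyProduct ls).map (fun p => a :: p))

-- [perm[i:i+2] for i in range(0, len(perm), 2)], each 2-slice read as the pair (x, y)
def pairsA (perm : List (List Int)) : List (List Int × List Int) :=
  (PySem.List.pyRange 0 perm.length 2).map (fun i =>
    match PySem.List.slice perm (some i) (some (i + 2)) with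
    | [x, y] => (x, y)
    | _ => ([], []))   -- unreachable on even-length perm

-- any(perm[i] > perm[i+2] for i in range(0, len(perm)-2, 2))
def chainA (perm : List (List Int)) : Bool :=
  (PySem.List.pyRange 0 ((perm.length : Int) - 2) 2).any (fun i =>
    decide (PySem.List.pyGetD perm (i + 2) [] < PySem.List.pyGetD perm i []))

-- the rotation-join loop for one pair (x, y)
def joinsA (x y : List Int) : List (List Int) :=
  (PySem.List.pyRange 0 (y.length : Int) 1).map (fun rot =>
    ((x.zip (PySem.List.slice y (some rot) none ++ PySem.List.slice y none (some rot))).flatMap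
      (fun ab => [ab.1, ab.2])))

def get_ways_even (group : List (List Int)) : List (List (List Int)) :=
  if group.length = 0 then [[]]
  else
    (PySem.List.permutations group group.length).foldl
      (fun ways perm =>
        if (pairsA perm).any (fun xy => decide (xy.2 < xy.1)) then ways
        else if chainA perm then ways
        else ways ++ pyProduct ((pairsA perm).map (fun xy => joinsA xy.1 xy.2)))
      []

-- ===== PORT B =====
def joinsB (x y : List Int) : List (List Int) :=
  (PySem.List.pyRange 0 (y.length : Int) 1).map (fun rot =>
    ((x.zip (PySem.List.slice y (some rot) none ++ PySem.List.slice y none (some rot))).flatMap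
      (fun ab => [ab.1, ab.2])))

-- _matchings; rem[:i]+rem[i+1:] is List.eraseIdx i (exact for 0 ≤ i < len).
-- fuel is only a structural-recursion guard (recursion depth ≤ length, so it is never exhausted).
def matchingsB : Nat → List (List Int) → List (List (List Int × List Int))
  | _, [] => [[]]
  | 0, _ :: _ => []
  | f+1, a :: tl =>
    let rem := a :: tl
    let mn := (PySem.List.min? rem (fun v => v)).getD []
    (List.range rem.length).flatMap (fun i =>
      if rem.getD i [] ≠ mn then []
      else
        let rest := rem.eraseIdx i
        (List.range rest.length).flatMap (fun j =>
          (matchingsB f (rest.eraseIdx j)).map (fun tail =>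
            (rem.getD i [], rest.getD j []) :: tail)))

def get_ways_even_alt (group : List (List Int)) : List (List (List Int)) :=
  if group.length = 0 then [[]]
  else
    (matchingsB group.length group).foldl
      (fun ways m => ways ++ pyProduct (m.map (fun xy => joinsB xy.1 xy.2))) []

-- ===== PRECONDITION & SPEC =====
-- Pre_ excludes odd-length groups, on which A's assert fails (AssertionError); A is total otherwise.
def Pre_get_ways_even (group : List (List Int)) : Prop := group.length % 2 = 0
instance (group : List (List Int)) : Decidable (Pre_get_ways_even group) := by
  unfold Pre_get_ways_even; infer_instance
def pvWitness_get_ways_even : List (List Int) := [[1], [2]]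

def Spec_get_ways_even (group : List (List Int)) (out : List (List (List Int))) : Prop := out = get_ways_even_alt group
instance (group : List (List Int)) (out : List (List (List Int))) : Decidable (Spec_get_ways_even group out) := by unfold Spec_get_ways_even; infer_instance

-- ===== CLAIM (what is proved, stated in full; the proofs are below) =====
def Claim_equal_get_ways_even : Prop := ∀ (group : List (List Int)), Dom_get_ways_even group → Pre_get_ways_even group → Spec_get_ways_even group (get_ways_even group)

-- ===== LEMMAS AND PROOFS =====

-- the flattening that sends a B-side pair sequence back to an A-side permutation
def flat2 (m : List (List Int × List Int)) : List (List Int) := m.flatMap (fun xy => [xy.1, xy.2])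

-- A's two filters, as one Bool predicate on the permutation
def goodA (perm : List (List Int)) : Bool :=
  !(pairsA perm).any (fun xy => decide (xy.2 < xy.1)) && !chainA perm

theorem flatMap_congr {α β : Type} (l : List α) (f g : α → List β)
    (h : ∀ a ∈ l, f a = g a) : l.flatMap f = l.flatMap g := by
  rw [List.flatMap_def, List.flatMap_def]
  exact congrArg _ (List.map_congr_left h)

theorem perms_succ (xs : List (List Int)) (r : Nat) :
    PySem.List.permutations xs (r+1) = (List.range xs.length).flatMap
      (fun i => (PySem.List.permutations (xs.eraseIdx i) r).map (fun p => xs.getD i [] :: p)) := by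
  rw [PySem.List.permutations]
  rw [List.flatMap_def, List.flatMap_def]; congr 1
  apply List.map_congr_left; intro i hi
  have h : i < xs.length := List.mem_range.mp hi
  simp [List.getElem?_eq_getElem h]

theorem pyRange2_eq (n : Nat) :
    PySem.List.pyRange 0 ((n:Int)) 2 = (List.range ((n+1)/2)).map (fun k : Nat => 2*(k:Int)) := by
  rw [PySem.List.pyRange_of_pos 0 n (by omega)]
  by_cases h : (0:Int) < n
  · rw [if_pos h]
    have h2 : ((n:Int) - 0 + 2 - 1) / 2 = (((n+1) / 2 : Nat) : Int) := by push_cast; omega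
    rw [h2, Int.toNat_natCast]
    apply List.map_congr_left; intro k _; ring
  · rw [if_neg h]
    have hn : n = 0 := by omega
    subst hn; simp

theorem pairsA_closed (perm : List (List Int)) :
    pairsA perm = (List.range ((perm.length+1)/2)).map (fun k =>
      match (perm.drop (2*k)).take 2 with
      | [x, y] => (x, y)
      | _ => (([]:List Int), ([]:List Int))) := by
  unfold pairsA
  rw [pyRange2_eq, List.map_map]
  apply List.map_congr_left; intro k _
  have h : PySem.List.slice perm (some (2*(k:Int))) (some (2*(k:Int) + 2)) = (perm.drop (2*k)).take 2 := by
    have h1 : (2*(k:Int)) = ((2*k : Nat) : Int) := by push_cast; ring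
    have h2 : (2*(k:Int) + 2) = ((2*k+2 : Nat) : Int) := by push_cast; ring
    rw [h2, h1, PySem.List.slice_natCast]
    congr 1; omega
  simp only [Function.comp]; rw [h]

theorem pairsA_nil : pairsA [] = [] := by decide

theorem pairsA_cons2 (x y : List Int) (q : List (List Int)) :
    pairsA (x :: y :: q) = (x, y) :: pairsA q := by
  rw [pairsA_closed, pairsA_closed]
  have hl : (x :: y :: q).length = q.length + 2 := rfl
  rw [hl]
  have hc : (q.length + 2 + 1)/2 = (q.length+1)/2 + 1 := by omega
  rw [hc, List.range_succ_eq_map, List.map_cons, List.map_map]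
  congr 1

theorem pyRangeM2_eq (n : Nat) :
    PySem.List.pyRange 0 ((n:Int) - 2) 2 = (List.range ((n-1)/2)).map (fun k : Nat => 2*(k:Int)) := by
  rw [PySem.List.pyRange_of_pos 0 ((n:Int)-2) (by omega)]
  by_cases h : (0:Int) < (n:Int) - 2
  · rw [if_pos h]
    have h2 : ((n:Int) - 2 - 0 + 2 - 1) / 2 = (((n-1) / 2 : Nat) : Int) := by push_cast; omega
    rw [h2, Int.toNat_natCast]
    apply List.map_congr_left; intro k _; ring
  · rw [if_neg h]
    have h2 : (n-1)/2 = 0 := by omega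
    rw [h2]; simp

theorem chainA_closed (perm : List (List Int)) :
    chainA perm = (List.range ((perm.length - 1)/2)).any
      (fun k => decide (perm.getD (2*k+2) [] < perm.getD (2*k) [])) := by
  unfold chainA
  rw [pyRangeM2_eq, List.any_map]
  congr 1; funext k
  have h1 : 2*(k:Int) = ((2*k:Nat):Int) := by push_cast; ring
  have h2' : ((2*k:Nat):Int) + 2 = ((2*k+2:Nat):Int) := by push_cast; ring
  simp only [Function.comp, h1, h2', PySem.List.pyGetD_natCast]

theorem chainA_cons2 (x y : List Int) (q : List (List Int)) :
    chainA (x :: y :: q) = (((!q.isEmpty) && decide (q.getD 0 [] < x)) || chainA q) := by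
  rw [chainA_closed, chainA_closed]
  cases q with
  | nil => simp
  | cons z t =>
    have hl : (x :: y :: z :: t).length = t.length + 3 := rfl
    have hl2 : (z :: t).length = t.length + 1 := rfl
    rw [hl, hl2]
    have hc : (t.length + 3 - 1)/2 = (t.length + 1 - 1)/2 + 1 := by omega
    rw [hc, List.range_succ_eq_map, List.any_cons, List.any_map]
    congr 1

theorem goodA_cons2 (x y : List Int) (q : List (List Int)) :
    goodA (x :: y :: q) =
      (!decide (y < x) && ((q.isEmpty || !decide (q.getD 0 [] < x)) && goodA q)) := by
  simp only [goodA, pairsA_cons2, chainA_cons2, List.any_cons]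
  cases h1 : decide (y < x) <;> cases h2 : q.isEmpty <;> cases h3 : chainA q <;>
    cases h4 : decide (q.getD 0 [] < x) <;> simp

-- head of a canonical permutation is a minimum of its elements
theorem head_min : ∀ (N : Nat) (q : List (List Int)), q.length ≤ N → goodA q = true →
    ∀ z ∈ q, ¬ z < q.getD 0 [] := by
  intro N
  induction N with
  | zero =>
    intro q hle _ z hz
    have hq : q = [] := List.eq_nil_of_length_eq_zero (by omega)
    subst hq; simp at hz
  | succ N ih =>
    intro q hle hg z hz
    cases q with
    | nil => simp at hz
    | cons w t =>
      cases t with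
      | nil =>
        simp at hz; subst hz
        exact List.lt_irrefl z
      | cons y t2 =>
        rw [goodA_cons2] at hg
        simp only [Bool.and_eq_true, Bool.not_eq_true', Bool.or_eq_true, decide_eq_false_iff_not,
          List.isEmpty_iff] at hg
        obtain ⟨h1, h2, h3⟩ := hg
        have hgd : (w :: y :: t2).getD 0 [] = w := rfl
        rw [hgd]
        rcases List.mem_cons.mp hz with hzw | hz2
        · subst hzw; exact List.lt_irrefl z
        rcases List.mem_cons.mp hz2 with hzy | hz3
        · subst hzy; exact h1
        · have ht2 : t2 ≠ [] := List.ne_nil_of_mem hz3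
          have h2' : ¬ t2.getD 0 [] < w := h2.resolve_left ht2
          have hlen : t2.length ≤ N := by
            simp only [List.length_cons] at hle; omega
          have := ih t2 hlen h3 z hz3
          exact IsOrderConnected.neg_trans this h2'

-- A as filter-then-flatMap over all permutations
theorem A_flat (group : List (List Int)) :
    get_ways_even group = ((PySem.List.permutations group group.length).filter goodA).flatMap
      (fun perm => pyProduct ((pairsA perm).map (fun xy => joinsA xy.1 xy.2))) := by
  unfold get_ways_even
  by_cases h : group.length = 0
  · rw [if_pos h]
    have hg : group = [] := List.eq_nil_of_length_eq_zero h
    subst hg; decide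
  · rw [if_neg h]
    have hbody : (fun (ways : List (List (List Int))) perm =>
        if (pairsA perm).any (fun xy => decide (xy.2 < xy.1)) then ways
        else if chainA perm then ways
        else ways ++ pyProduct ((pairsA perm).map (fun xy => joinsA xy.1 xy.2))) =
        (fun ways perm => if goodA perm then
          ways ++ pyProduct ((pairsA perm).map (fun xy => joinsA xy.1 xy.2)) else ways) := by
      funext ways perm
      unfold goodA
      cases h1 : (pairsA perm).any (fun xy => decide (xy.2 < xy.1)) <;>
        cases h2 : chainA perm <;> simp
    rw [hbody, PySem.List.foldl_if_eq_foldl_filter, PySem.List.foldl_append_eq_flatMap,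
      List.nil_append]

-- B as flatMap over the matchings
theorem B_flat (group : List (List Int)) :
    get_ways_even_alt group = (matchingsB group.length group).flatMap
      (fun m => pyProduct (m.map (fun xy => joinsB xy.1 xy.2))) := by
  unfold get_ways_even_alt
  by_cases h : group.length = 0
  · rw [if_pos h]
    have hg : group = [] := List.eq_nil_of_length_eq_zero h
    subst hg; decide
  · rw [if_neg h, PySem.List.foldl_append_eq_flatMap, List.nil_append]

theorem pairsA_flat2 : ∀ (m : List (List Int × List Int)), pairsA (flat2 m) = m := by
  intro m; induction m with
  | nil => exact pairsA_nil
  | cons xy m ih => simpa [flat2, pairsA_cons2] using ih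

-- the crux: the canonical permutations are exactly the flattened matchings, in order
theorem main_eq : ∀ (fuel : Nat) (rem : List (List Int)), rem.length ≤ fuel → rem.length % 2 = 0 →
    (PySem.List.permutations rem rem.length).filter goodA = (matchingsB fuel rem).map flat2 := by
  intro fuel
  induction fuel with
  | zero =>
    intro rem hle _
    have hq : rem = [] := List.eq_nil_of_length_eq_zero (by omega)
    subst hq; rfl
  | succ f ih =>
    intro rem hle hev
    by_cases h0 : rem = []
    · subst h0; rfl
    · obtain ⟨k, hk⟩ : ∃ k, rem.length = k + 2 := by
        have := List.length_pos_iff.mpr h0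
        exact ⟨rem.length - 2, by omega⟩
      obtain ⟨mn, hmn⟩ : ∃ mn, PySem.List.min? rem (fun v => v) = some mn := by
        cases hm : PySem.List.min? rem (fun v => v) with
        | none => exact absurd ((PySem.List.min?_eq_none_iff rem _).mp hm) h0
        | some m => exact ⟨m, rfl⟩
      have hmn' : @PySem.List.min? (List Int) (List Int) LinearOrder.toPartialOrder.toLT
          LinearOrder.toDecidableLT rem (fun v => v) = some mn := by convert hmn using 2
      have hmin : ∀ z ∈ rem, mn ≤ z := PySem.List.min?_isMin hmn'
      have hmnmem : mn ∈ rem := PySem.List.min?_mem hmn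
      have hB : matchingsB (f+1) rem = (List.range rem.length).flatMap (fun i =>
          if rem.getD i [] ≠ mn then []
          else (List.range (rem.eraseIdx i).length).flatMap (fun j =>
            (matchingsB f ((rem.eraseIdx i).eraseIdx j)).map (fun tail =>
              (rem.getD i [], (rem.eraseIdx i).getD j []) :: tail))) := by
        cases rem with
        | nil => exact absurd rfl h0
        | cons a tl => simp only [matchingsB, hmn, Option.getD_some]
      rw [hk, perms_succ rem (k+1), List.filter_flatMap, hB, List.map_flatMap]
      apply flatMap_congr; intro i hi
      have hilt : i < rem.length := List.mem_range.mp hi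
      have hrest : (rem.eraseIdx i).length = k + 1 := by
        simp only [List.length_eraseIdx, if_pos hilt]; omega
      have hxmem : rem.getD i [] ∈ rem := by
        rw [List.getD_eq_getElem?_getD, List.getElem?_eq_getElem hilt]
        exact List.getElem_mem hilt
      have hpermrest : rem.Perm (rem.getD i [] :: rem.eraseIdx i) := by
        rw [List.getD_eq_getElem?_getD, List.getElem?_eq_getElem hilt]
        exact (List.getElem_cons_eraseIdx_perm hilt).symm
      rw [perms_succ (rem.eraseIdx i) k, List.map_flatMap, List.filter_flatMap]
      by_cases hx : rem.getD i [] = mn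
      · rw [if_neg (by simpa using hx), List.map_flatMap]
        apply flatMap_congr; intro j hj
        have hjlt : j < (rem.eraseIdx i).length := List.mem_range.mp hj
        have hsub : ((rem.eraseIdx i).eraseIdx j).length = k := by
          rw [List.length_eraseIdx, if_pos hjlt, hrest]
          omega
        have hymem : (rem.eraseIdx i).getD j [] ∈ rem := by
          rw [List.getD_eq_getElem?_getD, List.getElem?_eq_getElem hjlt]
          exact List.mem_of_mem_eraseIdx (List.getElem_mem hjlt)
        rw [List.map_map, List.filter_map]
        have hfilter : ((PySem.List.permutations ((rem.eraseIdx i).eraseIdx j) k).filter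
            (goodA ∘ (fun p => rem.getD i [] :: p) ∘ (fun p => (rem.eraseIdx i).getD j [] :: p))) =
            ((PySem.List.permutations ((rem.eraseIdx i).eraseIdx j) k).filter goodA) := by
          apply List.filter_congr; intro q hq
          have hqperm : q.Perm ((rem.eraseIdx i).eraseIdx j) := by
            apply PySem.List.perm_of_mem_permutations
            rwa [← hsub] at hq
          simp only [Function.comp]
          rw [goodA_cons2]
          have h1 : decide ((rem.eraseIdx i).getD j [] < rem.getD i []) = false := by
            rw [decide_eq_false_iff_not, hx]
            exact not_lt.mpr (hmin _ hymem)
          have h2 : (q.isEmpty || !decide (q.getD 0 [] < rem.getD i [])) = true := by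
            cases hq0 : q with
            | nil => rfl
            | cons w t =>
              simp only [List.isEmpty_cons, Bool.false_or, Bool.not_eq_true',
                decide_eq_false_iff_not]
              have hw : (w :: t).getD 0 [] = w := rfl
              rw [hw, hx]
              have hwmem : w ∈ rem := by
                apply List.mem_of_mem_eraseIdx (l := rem)
                apply List.mem_of_mem_eraseIdx (l := rem.eraseIdx i)
                exact hqperm.subset (hq0 ▸ List.mem_cons_self)
              exact not_lt.mpr (hmin _ hwmem)
          rw [h1, h2]; simp
        rw [hfilter]
        have hIH := ih ((rem.eraseIdx i).eraseIdx j) (by rw [hsub]; omega) (by rw [hsub]; omega)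
        rw [hsub] at hIH
        rw [hIH, List.map_map, List.map_map]
        apply List.map_congr_left; intro t _
        rfl
      · rw [if_pos hx, List.map_nil]
        apply List.flatMap_eq_nil_iff.mpr
        intro j hj
        have hjlt : j < (rem.eraseIdx i).length := List.mem_range.mp hj
        have hsub : ((rem.eraseIdx i).eraseIdx j).length = k := by
          rw [List.length_eraseIdx, if_pos hjlt, hrest]
          omega
        have hrestperm : (rem.eraseIdx i).Perm
            ((rem.eraseIdx i).getD j [] :: (rem.eraseIdx i).eraseIdx j) := by
          rw [List.getD_eq_getElem?_getD, List.getElem?_eq_getElem hjlt]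
          exact (List.getElem_cons_eraseIdx_perm hjlt).symm
        apply List.filter_eq_nil_iff.mpr
        intro a ha
        obtain ⟨b, hb, rfl⟩ := List.mem_map.mp ha
        obtain ⟨q, hq, rfl⟩ := List.mem_map.mp hb
        have hqperm : q.Perm ((rem.eraseIdx i).eraseIdx j) := by
          apply PySem.List.perm_of_mem_permutations
          rwa [← hsub] at hq
        rw [goodA_cons2]
        intro habs
        simp only [Bool.and_eq_true, Bool.not_eq_true', Bool.or_eq_true,
          decide_eq_false_iff_not, List.isEmpty_iff] at habs
        obtain ⟨h1, h2, h3⟩ := habs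
        have hmnltx : mn < rem.getD i [] :=
          lt_of_le_of_ne (hmin _ hxmem) (fun e => hx e.symm)
        have hmnrest : mn ∈ rem.eraseIdx i := by
          rcases List.mem_cons.mp (hpermrest.subset hmnmem) with he | hm
          · exact absurd he.symm hx
          · exact hm
        rcases List.mem_cons.mp (hrestperm.subset hmnrest) with he | hmsub
        · exact h1 (he ▸ hmnltx)
        · have hmq : mn ∈ q := hqperm.symm.subset hmsub
          have hqne : q ≠ [] := List.ne_nil_of_mem hmq
          have h2' : ¬ q.getD 0 [] < rem.getD i [] := h2.resolve_left hqne
          have hhead : ¬ mn < q.getD 0 [] := head_min q.length q le_rfl h3 mn hmq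
          have hheadmem : q.getD 0 [] ∈ q := by
            cases q with
            | nil => exact absurd rfl hqne
            | cons w t => exact List.mem_cons_self
          have hheadrem : q.getD 0 [] ∈ rem := by
            apply List.mem_of_mem_eraseIdx (l := rem)
            apply List.mem_of_mem_eraseIdx (l := rem.eraseIdx i)
            exact hqperm.subset hheadmem
          have : q.getD 0 [] = mn := le_antisymm (not_lt.mp hhead) (hmin _ hheadrem)
          exact h2' (this ▸ hmnltx)

-- ===== VERDICT (by name: the statement is the Claim_ definition above) =====
theorem get_ways_even_spec : Claim_equal_get_ways_even := by
  intro group _ hpre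
  unfold Spec_get_ways_even
  rw [A_flat, B_flat, main_eq group.length group le_rfl hpre, List.flatMap_map]
  apply flatMap_congr; intro m hm
  simp only [pairsA_flat2]
  rfl
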